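-- pv_equiv track=rewrite | github.com/golosegor/pyspark-recursive-utils | nestedfunctions/functions/whitelist.py | __replace_elements_with_root
-- ===== SOURCE A (Python) =====
-- from typing import List, Set
--
-- def __replace_elements_with_root(fields: List[str], root: str) -> List[str]:
--     res = []
--     root_added = False
--     for f in fields:
--         if root in f:
--             if not root_added:
--                 root_added = True
--                 res.append(root)
--         else:
--             res.append(f)
--     return res
-- ===== SOURCE B (Python) =====
-- def __replace_elements_with_root(fields, root):
--     i = next((j for j, f in enumerate(fields) if root in f), None)
--     if i is None:
--         return list(fields)
--     return fields[:i] + [root] + [f for f in fields[i + 1:] if root not in f]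
-- ===== Notes on version B (the rewrite author's own statement) =====
-- stated objective: alternative
-- what changed: Replaces A's boolean-flag single pass with a locate-then-build decomposition: find the index of the first field containing root, then concatenate the untouched prefix, the root, and the filtered suffix.
import Mathlib
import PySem

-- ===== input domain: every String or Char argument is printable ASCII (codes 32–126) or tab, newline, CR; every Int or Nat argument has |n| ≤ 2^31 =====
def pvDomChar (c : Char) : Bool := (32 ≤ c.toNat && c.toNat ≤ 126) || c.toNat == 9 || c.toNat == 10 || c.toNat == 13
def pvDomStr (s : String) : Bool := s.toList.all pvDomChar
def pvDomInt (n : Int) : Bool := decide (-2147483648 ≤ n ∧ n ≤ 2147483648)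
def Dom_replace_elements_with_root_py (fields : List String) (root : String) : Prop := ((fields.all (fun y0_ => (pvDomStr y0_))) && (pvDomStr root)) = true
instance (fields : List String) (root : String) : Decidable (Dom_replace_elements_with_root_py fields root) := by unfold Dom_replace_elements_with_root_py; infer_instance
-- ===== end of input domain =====

-- B replaces A's boolean-flag single pass with a locate-then-build decomposition (find first
-- match, then prefix ++ [root] ++ filtered suffix); objective: alternative, same cost.


-- ===== PORT A =====
-- literal transliteration of A: one fold carrying (res, root_added)
def replace_elements_with_root_py (fields : List String) (root : String) : List String :=
  (fields.foldl
    (fun (st : List String × Bool) f =>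
      if PySem.Str.isIn root f then
        if !st.2 then (st.1 ++ [root], true) else st
      else (st.1 ++ [f], st.2))
    ([], false)).1

-- ===== PORT B =====
-- literal transliteration of B: locate first match, then prefix ++ [root] ++ filtered suffix
def replace_elements_with_root_py_alt (fields : List String) (root : String) : List String :=
  match fields.findIdx? (fun f => PySem.Str.isIn root f) with
  | none => fields
  | some i => fields.take i ++ [root] ++ (fields.drop (i + 1)).filter (fun f => !PySem.Str.isIn root f)

-- ===== PRECONDITION & SPEC =====
def Spec_replace_elements_with_root_py (fields : List String) (root : String) (out : List String) : Prop := out = replace_elements_with_root_py_alt fields root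
instance (fields : List String) (root : String) (out : List String) : Decidable (Spec_replace_elements_with_root_py fields root out) := by unfold Spec_replace_elements_with_root_py; infer_instance

-- ===== CLAIM (what is proved, stated in full; the proofs are below) =====
def Claim_equal_replace_elements_with_root_py : Prop := ∀ (fields : List String) (root : String), Dom_replace_elements_with_root_py fields root → Spec_replace_elements_with_root_py fields root (replace_elements_with_root_py fields root)

-- ===== LEMMAS AND PROOFS =====

-- once root_added is true, A's fold just filters the remaining fields
theorem pvA_fold_true (root : String) (fields : List String) (res : List String) :
    (fields.foldl
      (fun (st : List String × Bool) f =>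
        if PySem.Str.isIn root f then
          if !st.2 then (st.1 ++ [root], true) else st
        else (st.1 ++ [f], st.2))
      (res, true)).1 = res ++ fields.filter (fun f => !PySem.Str.isIn root f) := by
  induction fields generalizing res with
  | nil => simp
  | cons f rest ih =>
    by_cases h : PySem.Str.isIn root f = true <;>
      simp only [List.foldl_cons, h, Bool.not_true, Bool.not_false, Bool.false_eq_true,
        if_false, if_true, ih, List.filter_cons, List.nil_append, List.append_assoc,
        List.cons_append]

-- with root_added still false, A's fold appends B's result
theorem pvA_fold_false (root : String) (fields : List String) (res : List String) :
    (fields.foldl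
      (fun (st : List String × Bool) f =>
        if PySem.Str.isIn root f then
          if !st.2 then (st.1 ++ [root], true) else st
        else (st.1 ++ [f], st.2))
      (res, false)).1 = res ++ replace_elements_with_root_py_alt fields root := by
  induction fields generalizing res with
  | nil => simp [replace_elements_with_root_py_alt]
  | cons f rest ih =>
    by_cases h : PySem.Str.isIn root f = true
    · simp only [List.foldl_cons, h, if_true, Bool.not_false, pvA_fold_true,
        replace_elements_with_root_py_alt, List.findIdx?_cons]
      simp
    · simp only [List.foldl_cons, h, Bool.false_eq_true, if_false, ih]
      unfold replace_elements_with_root_py_alt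
      rw [List.findIdx?_cons]
      simp only [h, Bool.false_eq_true, if_false]
      cases hfi : rest.findIdx? (fun g => PySem.Str.isIn root g) with
      | none => simp
      | some i => simp

-- ===== VERDICT (by name: the statement is the Claim_ definition above) =====
theorem replace_elements_with_root_py_spec : Claim_equal_replace_elements_with_root_py := by
  intro fields root _
  unfold Spec_replace_elements_with_root_py replace_elements_with_root_py
  simpa using pvA_fold_false root fields []
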